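-- pv_equiv track=rewrite | github.com/jeffdshen/kaggle-public | feedback/datasets.py | split_offsets
-- ===== SOURCE A (Python) =====
-- def split_offsets(line):
--     words = line.split()
--     offsets = []
--     offset = 0
--     for word in words:
--         begin_offset = line.index(word, offset)
--         offset = begin_offset + len(word)
--         offsets.append((begin_offset, offset))
--     return offsets
-- ===== SOURCE B (Python) =====
-- def split_offsets(line):
--     offsets = []
--     start = None
--     for i, c in enumerate(line):
--         if c.isspace():
--             if start is not None:
--                 offsets.append((start, i))
--                 start = None
--         else:
--             if start is None:
--                 start = i
--     if start is not None:
--         offsets.append((start, len(line)))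
--     return offsets
-- ===== Notes on version B (the rewrite author's own statement) =====
-- stated objective: simpler
-- what changed: A calls line.split() and then re-finds each word with line.index(word, offset); B makes a single indexed pass over the characters, recording the start of each non-whitespace run and emitting (start, end) when the run closes.
import Mathlib
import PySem

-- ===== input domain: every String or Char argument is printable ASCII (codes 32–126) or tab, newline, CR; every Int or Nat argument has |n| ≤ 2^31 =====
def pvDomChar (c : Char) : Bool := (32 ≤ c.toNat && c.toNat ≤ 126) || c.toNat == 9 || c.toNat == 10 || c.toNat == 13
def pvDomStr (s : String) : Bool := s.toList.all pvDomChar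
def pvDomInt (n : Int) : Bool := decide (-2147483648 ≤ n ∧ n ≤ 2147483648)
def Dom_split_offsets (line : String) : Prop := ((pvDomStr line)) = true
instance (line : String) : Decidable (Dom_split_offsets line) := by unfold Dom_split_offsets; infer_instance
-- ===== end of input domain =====

-- B replaces A's split()-then-index() rescanning by a single indexed pass over the characters that tracks the start of the current word (objective: simpler, one pass).

-- ===== PORT A =====
def split_offsets (line : String) : List (Int × Int) :=
  let words := PySem.Str.split₀ line
  let r := words.foldl
    (fun (st : List (Int × Int) × Int) (word : String) =>
      let begin_offset := PySem.Str.findFrom line word st.2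
      let offset := begin_offset + PySem.Str.len word
      (st.1 ++ [(begin_offset, offset)], offset))
    ([], 0)
  r.1

-- ===== PORT B =====
def split_offsets_alt (line : String) : List (Int × Int) :=
  let r := (PySem.List.enumerate line.toList 0).foldl
    (fun (st : List (Int × Int) × Option Int) (p : Int × Char) =>
      if PySem.Chars.isspace p.2 then
        match st.2 with
        | some s => (st.1 ++ [(s, p.1)], none)
        | none => st
      else
        match st.2 with
        | some _ => st
        | none => (st.1, some p.1))
    ([], none)
  match r.2 with
  | some s => r.1 ++ [(s, PySem.Str.len line)]
  | none => r.1

-- ===== PRECONDITION & SPEC =====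
def Spec_split_offsets (line : String) (out : List (Int × Int)) : Prop := out = split_offsets_alt line
instance (line : String) (out : List (Int × Int)) : Decidable (Spec_split_offsets line out) := by unfold Spec_split_offsets; infer_instance

-- ===== CLAIM (what is proved, stated in full; the proofs are below) =====
def Claim_equal_split_offsets : Prop := ∀ (line : String), Dom_split_offsets line → Spec_split_offsets line (split_offsets line)

-- ===== LEMMAS AND PROOFS =====

def pvNonspace (c : Char) : Bool := !PySem.Chars.isspace c

def pvWords : List Char → List (List Char)
  | [] => []
  | c :: rest =>
    if PySem.Chars.isspace c then pvWords rest
    else (c :: rest.takeWhile pvNonspace) :: pvWords (rest.dropWhile pvNonspace)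
termination_by l => l.length
decreasing_by
  · simp
  · have := List.length_dropWhile_le pvNonspace rest; simp; omega

def pvOffs : List Char → Nat → List (Int × Int)
  | [], _ => []
  | c :: rest, i =>
    if PySem.Chars.isspace c then pvOffs rest (i + 1)
    else
      ((i : Int), ((i + 1 + (rest.takeWhile pvNonspace).length : Nat) : Int)) ::
        pvOffs (rest.dropWhile pvNonspace) (i + 1 + (rest.takeWhile pvNonspace).length)
termination_by l _ => l.length
decreasing_by
  · simp
  · have := List.length_dropWhile_le pvNonspace rest; simp; omega

theorem pvWords_nil : pvWords [] = [] := by rw [pvWords]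

theorem pvWords_cons (c : Char) (rest : List Char) : pvWords (c :: rest) = if PySem.Chars.isspace c then pvWords rest else (c :: rest.takeWhile pvNonspace) :: pvWords (rest.dropWhile pvNonspace) := by rw [pvWords]

theorem pvOffs_nil (i : Nat) : pvOffs [] i = [] := by rw [pvOffs]

theorem pvOffs_cons (c : Char) (rest : List Char) (i : Nat) : pvOffs (c :: rest) i = if PySem.Chars.isspace c then pvOffs rest (i + 1) else ((i : Int), ((i + 1 + (rest.takeWhile pvNonspace).length : Nat) : Int)) :: pvOffs (rest.dropWhile pvNonspace) (i + 1 + (rest.takeWhile pvNonspace).length) := by rw [pvOffs]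

theorem pv_drop_takeWhile (p : Char → Bool) (l : List Char) : l.drop (l.takeWhile p).length = l.dropWhile p := by
  nth_rewrite 2 [← List.takeWhile_append_dropWhile (p := p) (l := l)]
  rw [List.drop_left]

theorem pv_go_acc (s : List Char) : ∀ cur acc, PySem.Chars.split₀.go s cur acc = acc.reverse ++ PySem.Chars.split₀.go s cur [] := by
  induction s with
  | nil => intro cur acc; rw [PySem.Chars.split₀.go, PySem.Chars.split₀.go]; split <;> simp
  | cons c rest ih =>
    intro cur acc
    rw [PySem.Chars.split₀.go]; conv_rhs => rw [PySem.Chars.split₀.go]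
    split
    · split
      · exact ih [] acc
      · rw [ih [] (cur.reverse :: acc), ih [] [cur.reverse]]; simp
    · rw [ih (c :: cur) acc]

theorem pv_split₀_eq_words (s : List Char) :
    PySem.Chars.split₀.go s [] [] = pvWords s ∧
    ∀ cur : List Char, cur ≠ [] → PySem.Chars.split₀.go s cur [] = (cur.reverse ++ s.takeWhile pvNonspace) :: pvWords (s.dropWhile pvNonspace) := by
  induction s with
  | nil =>
    constructor
    · rw [PySem.Chars.split₀.go, pvWords_nil]; simp
    · intro cur h; rw [PySem.Chars.split₀.go]; simp [h, pvWords_nil]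
  | cons c rest ih =>
    constructor
    · rw [PySem.Chars.split₀.go, pvWords_cons]
      split
      · simpa using ih.1
      · rename_i hc
        rw [ih.2 [c] (by simp)]
        simp [pvNonspace, hc]
    · intro cur h
      rw [PySem.Chars.split₀.go]
      split
      · rename_i hc
        rw [if_neg (by simpa using h), pv_go_acc, ih.1]
        simp [List.takeWhile_cons, List.dropWhile_cons, pvNonspace, hc, pvWords_cons]
      · rename_i hc
        rw [ih.2 (c :: cur) (by simp)]
        simp [List.takeWhile_cons, List.dropWhile_cons, pvNonspace, hc]

theorem pv_findFrom_eq (cs w : List Char) (p o : Nat) (hpo : p ≤ o) (hoL : o < cs.length)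
    (hsp : ∀ q (hq : q < cs.length), p ≤ q → q < o → PySem.Chars.isspace cs[q])
    (hw : w <+: cs.drop o) (hne : ∃ wc wrest, w = wc :: wrest ∧ pvNonspace wc) :
    PySem.Chars.findFrom cs w (p : Int) none = (o : Int) := by
  obtain ⟨wc, wrest, hwe, hwc⟩ := hne
  have hpL : p ≤ cs.length := le_of_lt (lt_of_le_of_lt hpo hoL)
  rw [PySem.Chars.findFrom_natCast cs w p hpL]
  -- key: w is not a prefix of cs.drop q for p ≤ q < o (those chars are whitespace, wc is not)
  have hnot : ∀ q, p ≤ q → q < o → ¬ w <+: cs.drop q := by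
    intro q hq1 hq2 hpre
    have hqL : q < cs.length := lt_trans hq2 hoL
    obtain ⟨t, ht⟩ := hpre
    have hcq : cs[q] = wc := by
      have h1 : (List.drop q cs)[0]? = some wc := by rw [← ht, hwe]; simp
      have h2 : (List.drop q cs)[0]? = some cs[q] := by
        rw [List.getElem?_drop]; simp [hqL]
      exact (Option.some.inj (h2.symm.trans h1))
    have hs := hsp q hqL hq1 hq2
    rw [hcq] at hs
    simp [pvNonspace, hs] at hwc
  -- occurrence at o - p within cs.drop p
  have hocc : w <+: (cs.drop p).drop (o - p) := by
    rwa [List.drop_drop, Nat.add_sub_cancel' hpo]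
  have hIn : PySem.Chars.isIn w (cs.drop p) = true :=
    (PySem.Chars.exists_prefix_drop_iff_isIn w (cs.drop p)).mp ⟨o - p, hocc⟩
  have hfind_ne : PySem.Chars.find (cs.drop p) w ≠ -1 := by
    rw [PySem.Chars.find_ne_neg_one_iff]
    exact (PySem.Chars.isIn_iff_infix w (cs.drop p)).mp hIn
  have hnn : 0 ≤ PySem.Chars.find (cs.drop p) w := by
    rw [PySem.Chars.find_nonneg_iff]
    exact (PySem.Chars.isIn_iff_infix w (cs.drop p)).mp hIn
  obtain ⟨hpre, hmin⟩ := PySem.Chars.find_spec hnn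
  set f := PySem.Chars.find (cs.drop p) w with hf
  have hfe : f.toNat = o - p := by
    rcases Nat.lt_trichotomy f.toNat (o - p) with h | h | h
    · exfalso
      have hno : ¬ w <+: cs.drop (p + f.toNat) := hnot (p + f.toNat) (by omega) (by omega)
      rw [List.drop_drop] at hpre
      exact hno hpre
    · exact h
    · exact absurd hocc (hmin (o - p) h)
  rw [if_neg hfind_ne]
  omega

theorem pv_A_loop (cs : List Char) : ∀ n o p acc, cs.length - o ≤ n → p ≤ o → o ≤ cs.length →
    (∀ q (hq : q < cs.length), p ≤ q → q < o → PySem.Chars.isspace cs[q]) →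
    ((pvWords (cs.drop o)).foldl
      (fun (st : List (Int × Int) × Int) (w : List Char) =>
        let b := PySem.Chars.findFrom cs w st.2 none
        (st.1 ++ [(b, b + PySem.Chars.len w)], b + PySem.Chars.len w)) (acc, (p : Int))).1
      = acc ++ pvOffs (cs.drop o) o := by
  intro n
  induction n with
  | zero =>
    intro o p acc hn hpo hoL hsp
    have : cs.drop o = [] := by
      have := List.length_drop (l := cs) (i := o); rw [List.eq_nil_iff_length_eq_zero]; omega
    simp [this, pvWords_nil, pvOffs_nil]
  | succ n ih =>
    intro o p acc hn hpo hoL hsp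
    cases hdrop : cs.drop o with
    | nil => simp [pvWords_nil, pvOffs_nil]
    | cons c rest =>
      have hoLt : o < cs.length := by
        by_contra h
        rw [List.drop_eq_nil_of_le (by omega)] at hdrop; simp at hdrop
      have hco : cs[o] = c := by
        have h2 : (List.drop o cs)[0]? = some cs[o] := by
          rw [List.getElem?_drop]; simp [hoLt]
        rw [hdrop] at h2; simpa using h2.symm
      by_cases hc : PySem.Chars.isspace c
      · -- skip a whitespace char: words unchanged, offset o advances
        have hdrop1 : cs.drop (o + 1) = rest := by
          have h1 : (cs.drop o).drop 1 = cs.drop (o + 1) := by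
            rw [List.drop_drop]
          rw [← h1, hdrop]; rfl
        rw [pvWords_cons, pvOffs_cons, if_pos hc, if_pos hc, ← hdrop1]
        exact ih (o + 1) p acc (by omega) (by omega) (by omega)
          (by intro q hq h1 h2
              rcases Nat.lt_or_ge q o with h | h
              · exact hsp q hq h1 h
              · have heq : q = o := by omega
                subst heq; simpa [hco] using hc)
      · -- a word starts at o
        have hwpre : (c :: rest.takeWhile pvNonspace) <+: cs.drop o := by
          rw [hdrop]
          exact (List.prefix_cons_inj c).mpr (List.takeWhile_prefix pvNonspace)
        have hwlen : (rest.takeWhile pvNonspace).length + 1 ≤ cs.length - o := by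
          have := hwpre.length_le
          rw [List.length_drop] at this; simpa using this
        have hfind : PySem.Chars.findFrom cs (c :: rest.takeWhile pvNonspace) (p : Int) none = (o : Int) :=
          pv_findFrom_eq cs _ p o hpo hoLt hsp hwpre
            ⟨c, rest.takeWhile pvNonspace, rfl, by simp [pvNonspace, hc]⟩
        have hcast : (o : Int) + PySem.Chars.len (c :: rest.takeWhile pvNonspace)
            = ((o + 1 + (rest.takeWhile pvNonspace).length : Nat) : Int) := by
          simp [PySem.Chars.len_eq]; ring
        have hdrop2 : cs.drop (o + 1 + (rest.takeWhile pvNonspace).length) = rest.dropWhile pvNonspace := by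
          have h1 : (cs.drop o).drop (1 + (rest.takeWhile pvNonspace).length)
              = cs.drop (o + 1 + (rest.takeWhile pvNonspace).length) := by
            rw [List.drop_drop]; congr 1; omega
          rw [← h1, hdrop, Nat.add_comm 1 _, List.drop_succ_cons, pv_drop_takeWhile]
        rw [pvWords_cons, if_neg hc, pvOffs_cons, if_neg hc]
        simp only [List.foldl_cons, hfind, hcast]
        rw [← hdrop2]
        have := ih (o + 1 + (rest.takeWhile pvNonspace).length) (o + 1 + (rest.takeWhile pvNonspace).length)
          (acc ++ [((o : Int), ((o + 1 + (rest.takeWhile pvNonspace).length : Nat) : Int))])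
          (by omega) (le_refl _) (by omega)
          (by intro q hq h1 h2; omega)
        simpa using this

def pvStepB (st : List (Int × Int) × Option Int) (p : Int × Char) : List (Int × Int) × Option Int :=
  if PySem.Chars.isspace p.2 then
    match st.2 with
    | some s => (st.1 ++ [(s, p.1)], none)
    | none => st
  else
    match st.2 with
    | some _ => st
    | none => (st.1, some p.1)

theorem pv_B_run (ws : List Char) : ∀ (i : Int) acc (s : Int), (∀ c ∈ ws, pvNonspace c) →
    (PySem.List.enumerate ws i).foldl pvStepB (acc, some s) = (acc, some s) := by
  induction ws with
  | nil => intro i acc s _; simp [PySem.List.enumerate_nil]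
  | cons c rest ih =>
    intro i acc s h
    rw [PySem.List.enumerate_cons, List.foldl_cons]
    have hc : pvNonspace c := h c (by simp)
    simp only [pvNonspace, Bool.not_eq_true'] at hc
    rw [show pvStepB (acc, some s) (i, c) = (acc, some s) from by simp [pvStepB, hc]]
    exact ih (i + 1) acc s (fun d hd => h d (by simp [hd]))

theorem pv_B_loop : ∀ n (cs : List Char) (i : Nat) acc, cs.length ≤ n →
    (match ((PySem.List.enumerate cs (i : Int)).foldl pvStepB (acc, none)).2 with
     | some s => ((PySem.List.enumerate cs (i : Int)).foldl pvStepB (acc, none)).1 ++ [(s, ((i + cs.length : Nat) : Int))]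
     | none => ((PySem.List.enumerate cs (i : Int)).foldl pvStepB (acc, none)).1)
      = acc ++ pvOffs cs i := by
  intro n
  induction n with
  | zero =>
    intro cs i acc hn
    have : cs = [] := by rw [List.eq_nil_iff_length_eq_zero]; omega
    subst this
    simp [PySem.List.enumerate_nil, pvOffs_nil]
  | succ n ih =>
    intro cs i acc hn
    cases cs with
    | nil => simp [PySem.List.enumerate_nil, pvOffs_nil]
    | cons c rest =>
      rw [PySem.List.enumerate_cons, List.foldl_cons, pvOffs_cons]
      by_cases hc : PySem.Chars.isspace c
      · rw [if_pos hc]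
        rw [show pvStepB (acc, none) ((i : Int), c) = (acc, none) from by simp [pvStepB, hc]]
        have h2 := ih rest (i + 1) acc (by simp at hn; omega)
        rw [Nat.cast_add, Nat.cast_one] at h2
        simp only [List.length_cons]
        rw [show i + (rest.length + 1) = (i + 1) + rest.length from by omega]
        exact h2
      · rw [if_neg hc]
        rw [show pvStepB (acc, none) ((i : Int), c) = (acc, some (i : Int)) from by simp [pvStepB, hc]]
        have hsplit : rest.takeWhile pvNonspace ++ rest.dropWhile pvNonspace = rest :=
          List.takeWhile_append_dropWhile
        rw [show PySem.List.enumerate rest ((i : Int) + 1)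
            = PySem.List.enumerate (rest.takeWhile pvNonspace) ((i : Int) + 1)
              ++ PySem.List.enumerate (rest.dropWhile pvNonspace) (((i : Int) + 1) + (rest.takeWhile pvNonspace).length) from by
          conv_lhs => rw [← hsplit]
          exact PySem.List.enumerate_append _ _ _]
        rw [List.foldl_append]
        rw [pv_B_run _ _ _ _ (fun d hd => List.mem_takeWhile_imp hd)]
        cases hdw : rest.dropWhile pvNonspace with
        | nil =>
          have hlen : rest.length = (rest.takeWhile pvNonspace).length := by
            conv_lhs => rw [← hsplit]
            rw [hdw]; simp
          simp only [PySem.List.enumerate_nil, List.foldl_nil, pvOffs_nil, List.length_cons]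
          rw [show i + (rest.length + 1) = i + 1 + (rest.takeWhile pvNonspace).length from by omega]
        | cons d ds =>
          have hd : PySem.Chars.isspace d := by
            have h2 := List.head_dropWhile_not pvNonspace (l := rest) (by simp [hdw])
            have h3 : (rest.dropWhile pvNonspace).head (by simp [hdw]) = d := by simp [hdw]
            rw [h3] at h2
            simpa [pvNonspace] using h2
          have hlen : rest.length = (rest.takeWhile pvNonspace).length + ds.length + 1 := by
            conv_lhs => rw [← hsplit]
            rw [hdw]; simp; omega
          rw [PySem.List.enumerate_cons, List.foldl_cons]
          rw [show pvStepB (acc, some (i : Int)) (((i : Int) + 1) + (rest.takeWhile pvNonspace).length, d)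
              = (acc ++ [((i : Int), ((i + 1 + (rest.takeWhile pvNonspace).length : Nat) : Int))], none) from by
            simp [pvStepB, hd]]
          have h2 := ih ds (i + 1 + (rest.takeWhile pvNonspace).length + 1)
            (acc ++ [((i : Int), ((i + 1 + (rest.takeWhile pvNonspace).length : Nat) : Int))])
            (by have h4 := hn; simp at h4; omega)
          rw [show ((i + 1 + (rest.takeWhile pvNonspace).length + 1 : Nat) : Int)
              = (((i : Int) + 1) + (rest.takeWhile pvNonspace).length) + 1 from by push_cast; ring] at h2
          rw [show i + 1 + (rest.takeWhile pvNonspace).length + 1 + ds.length = i + (c :: rest).length from by simp; omega] at h2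
          rw [h2, pvOffs_cons, if_pos hd]
          simp

theorem pv_A_eq (line : String) : split_offsets line = pvOffs line.toList 0 := by
  have hfold := pv_A_loop line.toList line.toList.length 0 0 [] (by omega) (le_refl 0) (by omega)
    (by intro q hq h1 h2; omega)
  simp only [List.drop_zero] at hfold
  have hwords : PySem.Str.split₀ line = (pvWords line.toList).map String.ofList := by
    rw [PySem.Str.split₀, PySem.Chars.split₀, (pv_split₀_eq_words line.toList).1]
  rw [split_offsets, hwords, List.foldl_map]
  simp only [PySem.Str.findFrom_eq, String.toList_ofList, PySem.Str.len_eq]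
  simpa using hfold

theorem pv_B_eq (line : String) : split_offsets_alt line = pvOffs line.toList 0 := by
  have h2 := pv_B_loop line.toList.length line.toList 0 [] (le_refl _)
  simp only [Nat.cast_zero, zero_add, List.nil_append] at h2
  rw [split_offsets_alt]
  show (match ((PySem.List.enumerate line.toList 0).foldl pvStepB ([], none)).2 with
    | some s => ((PySem.List.enumerate line.toList 0).foldl pvStepB ([], none)).1 ++ [(s, PySem.Str.len line)]
    | none => ((PySem.List.enumerate line.toList 0).foldl pvStepB ([], none)).1) = pvOffs line.toList 0
  rw [show PySem.Str.len line = ((line.toList.length : Nat) : Int) from by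
    simp [PySem.Str.len_eq]]
  exact h2

-- ===== VERDICT (by name: the statement is the Claim_ definition above) =====
theorem split_offsets_spec : Claim_equal_split_offsets := by
  intro line _
  unfold Spec_split_offsets
  rw [pv_A_eq, pv_B_eq]
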